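-- pv_equiv track=rewrite | github.com/ahmetax/trderlem | txtokuyucu.py | is_tek_tirnak_alpha
-- ===== SOURCE A (Python) =====
-- def is_tirnak_icinde(sozcuk):
--     if sozcuk[0]=="'" or sozcuk[-1]== "'":
--         return True
--     elif sozcuk[0]=='"' or sozcuk[-1]== '"':
--         return True
--     else:
--         return False
--
-- def is_tek_tirnak_alpha(sozcuk):
--     if is_tirnak_icinde(sozcuk):
--         return False
--     var = 0
--     say0=-1
--     for say in range(len(sozcuk)):
--         if sozcuk[say] == "'":
--             if say==0 or say == len(sozcuk)-1:
--                 return False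
--             if say0<0:
--                 say0 = say
--             var +=1
--
--     if var==1:
--         s1 = sozcuk[:say0]
--         s2 = sozcuk[say0+1:]
--         if s1.isalpha() and s2.isalpha():
--             return True
--         else:
--             return False
--     else:
--         return False
-- ===== SOURCE B (Python) =====
-- def is_tek_tirnak_alpha(sozcuk):
--     # one-pass state machine: reject edge quotes, then scan once,
--     # tracking whether the single interior quote has been seen
--     if sozcuk[0] in "'\"" or sozcuk[-1] in "'\"":
--         return False
--     seen = False
--     for ch in sozcuk:
--         if ch == "'":
--             if seen:
--                 return False
--             seen = True
--         elif not ch.isalpha():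
--             return False
--     return seen
-- ===== Notes on version B (the rewrite author's own statement) =====
-- stated objective: simpler
-- what changed: A counts quotes over character indices, records the first quote index, then slices the string and runs isalpha on both slices; B is a single early-exit state-machine pass over the characters that tracks one boolean (interior quote seen) and rejects any non-alpha character directly, with no indices, slices or counters.
import Mathlib
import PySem

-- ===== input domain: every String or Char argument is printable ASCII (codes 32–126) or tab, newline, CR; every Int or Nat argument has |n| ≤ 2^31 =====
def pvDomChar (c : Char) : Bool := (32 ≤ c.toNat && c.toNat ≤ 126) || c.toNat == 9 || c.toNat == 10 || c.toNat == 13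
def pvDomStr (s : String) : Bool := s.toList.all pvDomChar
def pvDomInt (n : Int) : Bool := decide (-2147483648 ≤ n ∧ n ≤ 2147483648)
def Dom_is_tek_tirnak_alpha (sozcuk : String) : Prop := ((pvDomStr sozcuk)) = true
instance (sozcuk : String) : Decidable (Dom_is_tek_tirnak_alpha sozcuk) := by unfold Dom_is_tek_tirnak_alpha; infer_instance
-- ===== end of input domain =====

-- B replaces A's index-counting scan plus slice-and-isalpha check by a single
-- early-exit state-machine pass over the characters (objective: simpler).

-- ===== PORT A =====
def is_tirnak_icinde (sozcuk : String) : Bool :=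
  -- sozcuk[0] / sozcuk[-1]: total pyGetD is exact here since Pre_ excludes the empty string
  if PySem.List.pyGetD sozcuk.toList 0 ' ' = '\'' ∨ PySem.List.pyGetD sozcuk.toList (-1) ' ' = '\'' then true
  else if PySem.List.pyGetD sozcuk.toList 0 ' ' = '"' ∨ PySem.List.pyGetD sozcuk.toList (-1) ' ' = '"' then true
  else false

-- the 'for say in range(len(sozcuk))' loop; none = the early 'return False'
def sayLoop (cs : List Char) : List Int → Int → Int → Option (Int × Int)
  | [], var, say0 => some (var, say0)
  | say :: rest, var, say0 =>
    if PySem.List.pyGetD cs say ' ' = '\'' then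
      if say = 0 ∨ say = (cs.length : Int) - 1 then none
      else if say0 < 0 then sayLoop cs rest (var + 1) say
      else sayLoop cs rest (var + 1) say0
    else sayLoop cs rest var say0

def is_tek_tirnak_alpha (sozcuk : String) : Bool :=
  if is_tirnak_icinde sozcuk then false
  else
    (sayLoop sozcuk.toList (PySem.List.pyRange 0 sozcuk.toList.length 1) 0 (-1)).elim false
      (fun p =>  -- p = (var, say0); none above = the loop's early 'return False'
        if p.1 = 1 then
          if PySem.Chars.strIsalpha (PySem.List.slice sozcuk.toList none (some p.2)) &&
             PySem.Chars.strIsalpha (PySem.List.slice sozcuk.toList (some (p.2 + 1)) none) then true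
          else false
        else false)

-- ===== PORT B =====
-- one pass: 'seen' = the single interior quote has been met; early false otherwise
def altScan : List Char → Bool → Bool
  | [], seen => seen
  | c :: rest, seen =>
    if c = '\'' then (if seen then false else altScan rest true)
    else if !PySem.Chars.isalpha c then false
    else altScan rest seen

def is_tek_tirnak_alpha_alt (sozcuk : String) : Bool :=
  -- guard: sozcuk[0] in "'\"" or sozcuk[-1] in "'\"" (pyGetD exact under Pre_)
  if (PySem.List.pyGetD sozcuk.toList 0 ' ' = '\'' ∨ PySem.List.pyGetD sozcuk.toList 0 ' ' = '"') ∨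
     (PySem.List.pyGetD sozcuk.toList (-1) ' ' = '\'' ∨ PySem.List.pyGetD sozcuk.toList (-1) ' ' = '"') then false
  else altScan sozcuk.toList false

-- ===== PRECONDITION & SPEC =====
-- Pre_ excludes only the empty string, on which A (and B) raise IndexError at sozcuk[0].
def Pre_is_tek_tirnak_alpha (sozcuk : String) : Prop := sozcuk.toList ≠ []
instance (sozcuk : String) : Decidable (Pre_is_tek_tirnak_alpha sozcuk) := by unfold Pre_is_tek_tirnak_alpha; infer_instance
def pvWitness_is_tek_tirnak_alpha : String := "ab'cd"

def Spec_is_tek_tirnak_alpha (sozcuk : String) (out : Bool) : Prop := out = is_tek_tirnak_alpha_alt sozcuk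
instance (sozcuk : String) (out : Bool) : Decidable (Spec_is_tek_tirnak_alpha sozcuk out) := by unfold Spec_is_tek_tirnak_alpha; infer_instance

-- ===== CLAIM (what is proved, stated in full; the proofs are below) =====
def Claim_equal_is_tek_tirnak_alpha : Prop := ∀ (sozcuk : String), Dom_is_tek_tirnak_alpha sozcuk → Pre_is_tek_tirnak_alpha sozcuk → Spec_is_tek_tirnak_alpha sozcuk (is_tek_tirnak_alpha sozcuk)

-- ===== LEMMAS AND PROOFS =====

-- B's scan, characterised: exactly one quote counting 'seen', all other chars alpha
lemma altScan_eq (cs : List Char) : ∀ seen : Bool,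
    altScan cs seen =
      (decide (cs.count '\'' + (if seen then 1 else 0) = 1) &&
        cs.all (fun c => c == '\'' || PySem.Chars.isalpha c)) := by
  induction cs with
  | nil => intro seen; cases seen <;> simp [altScan]
  | cons c rest ih =>
    intro seen
    by_cases hc : c = '\''
    · subst hc
      cases seen
      · simp [altScan, ih, List.count_cons]
        all_goals omega
      · simp [altScan, List.count_cons]
        all_goals omega
    · by_cases ha : PySem.Chars.isalpha c
      · simp [altScan, hc, ha, ih, List.count_cons]
      · simp [altScan, hc, ha, List.count_cons]
        all_goals omega

-- A's loop, characterised: it counts the quotes and records the first quote index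
lemma sayLoop_spec (cs : List Char)
    (hq : ∀ j : Nat, (h : j < cs.length) → cs[j] = '\'' → 0 < j ∧ j < cs.length - 1) :
    ∀ n k : Nat, cs.length - k = n → k ≤ cs.length →
      ∀ (var say0 : Int), -1 ≤ say0 →
      sayLoop cs (PySem.List.pyRange k cs.length 1) var say0 =
        some (var + ((cs.drop k).count '\'' : Int),
              if say0 < 0 then
                (match (cs.drop k).findIdx? (· == '\'') with
                 | none => -1
                 | some j => ((k + j : Nat) : Int))
              else say0) := by
  intro n
  induction n with
  | zero =>
    intro k hn hk var say0 hs
    have hk' : k = cs.length := by omega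
    subst hk'
    rw [PySem.List.pyRange_one_eq_nil (by omega)]
    simp [sayLoop, List.drop_length]
    omega
  | succ n ih =>
    intro k hn hk var say0 hs
    have hklt : k < cs.length := by omega
    rw [PySem.List.pyRange_one_cons (by exact_mod_cast hklt)]
    have hget : PySem.List.pyGetD cs (k : Int) ' ' = cs[k] := by
      simp [PySem.List.pyGetD_natCast, List.getD_eq_getElem?_getD, hklt]
    have hdrop : cs.drop k = cs[k] :: cs.drop (k + 1) := List.drop_eq_getElem_cons hklt
    by_cases hc : cs[k] = '\''
    · obtain ⟨hj0, hjl⟩ := hq k hklt hc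
      have hne : ¬ ((k : Int) = 0 ∨ (k : Int) = (cs.length : Int) - 1) := by
        push_neg; constructor <;> [exact_mod_cast (by omega : (k:Int) ≠ 0); omega]
      have hcb' : (cs[k] == '\'') = true := by simp [hc]
      have hcnt : List.count '\'' (List.drop k cs) = List.count '\'' (List.drop (k+1) cs) + 1 := by
        rw [hdrop, List.count_cons, hcb']; simp
      have hfind : List.findIdx? (fun x => x == '\'') (List.drop k cs) = some 0 := by
        rw [hdrop, List.findIdx?_cons]; simp [hcb']
      simp only [sayLoop, hget, hc, if_pos rfl, if_neg hne]
      rw [hcnt, hfind]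
      by_cases hs0 : say0 < 0
      · have hrec := ih (k+1) (by omega) (by omega) (var+1) (k : Int) (by omega)
        push_cast at hrec
        rw [if_pos hs0, hrec]
        simp [hs0, (by omega : ¬ (k : Int) < 0)]
        all_goals omega
      · have hrec := ih (k+1) (by omega) (by omega) (var+1) say0 hs
        push_cast at hrec
        rw [if_neg hs0, hrec]
        simp [hs0]
        all_goals omega
    · have hcb : (cs[k] == '\'') = false := by simp [hc]
      have hcnt : List.count '\'' (List.drop k cs) = List.count '\'' (List.drop (k+1) cs) := by
        rw [hdrop, List.count_cons, hcb]; simp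
      have hfind : List.findIdx? (fun x => x == '\'') (List.drop k cs) =
          (List.findIdx? (fun x => x == '\'') (List.drop (k+1) cs)).map (· + 1) := by
        rw [hdrop, List.findIdx?_cons]; simp [hcb]
      have hrec := ih (k+1) (by omega) (by omega) var say0 hs
      push_cast at hrec
      simp only [sayLoop, hget, if_neg hc]
      rw [hrec, hcnt, hfind]
      by_cases hs0 : say0 < 0
      · cases hfi : List.findIdx? (fun x => x == '\'') (List.drop (k+1) cs) with
        | none => simp [hs0, hfi]
        | some j =>
          simp [hs0, hfi]
          all_goals (push_cast; first | ring | omega)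
      · simp [hs0]

-- on a quote-free list, 'quote-or-alpha' is just 'alpha'
lemma all_qoa_of_no_quote : ∀ (l : List Char), (∀ c ∈ l, c ≠ '\'') →
    l.all (fun c => c == '\'' || PySem.Chars.isalpha c) = l.all PySem.Chars.isalpha := by
  intro l
  induction l with
  | nil => intro _; rfl
  | cons c t ih =>
    intro h
    have hc : (c == '\'') = false := by simpa using h c List.mem_cons_self
    have ht := ih (fun x hx => h x (List.mem_cons_of_mem _ hx))
    simp only [List.all_cons, hc, Bool.false_or, ht]

-- ===== VERDICT (by name: the statement is the Claim_ definition above) =====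
theorem is_tek_tirnak_alpha_spec : Claim_equal_is_tek_tirnak_alpha := by
  intro s _hdom hpre
  unfold Spec_is_tek_tirnak_alpha
  unfold Pre_is_tek_tirnak_alpha at hpre
  have hlen : 0 < s.toList.length := List.length_pos_iff.mpr hpre
  have h0 : PySem.List.pyGetD s.toList 0 ' ' = s.toList[0] := by
    simp [PySem.List.pyGetD_zero, List.getD_eq_getElem?_getD, List.getElem?_eq_getElem hlen]
  have hL : PySem.List.pyGetD s.toList (-1) ' ' = s.toList[s.toList.length - 1] :=
    PySem.List.pyGetD_neg_ofNat s.toList 1 ' ' (by omega) (by omega)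
  unfold is_tek_tirnak_alpha is_tek_tirnak_alpha_alt is_tirnak_icinde
  simp only [h0, hL]
  by_cases hg : (s.toList[0] = '\'' ∨ s.toList[0] = '"') ∨
      (s.toList[s.toList.length - 1] = '\'' ∨ s.toList[s.toList.length - 1] = '"')
  · rw [if_pos hg]
    rw [if_pos (show (if (s.toList[0] = '\'' ∨ s.toList[s.toList.length - 1] = '\'') then true
        else if (s.toList[0] = '"' ∨ s.toList[s.toList.length - 1] = '"') then true else false) = true by
      by_cases h1 : s.toList[0] = '\'' ∨ s.toList[s.toList.length - 1] = '\''
      · rw [if_pos h1]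
      · rw [if_neg h1, if_pos (show s.toList[0] = '"' ∨ s.toList[s.toList.length - 1] = '"' by tauto)])]
  · have h1 : ¬ (s.toList[0] = '\'' ∨ s.toList[s.toList.length - 1] = '\'') := by tauto
    have h2 : ¬ (s.toList[0] = '"' ∨ s.toList[s.toList.length - 1] = '"') := by tauto
    rw [if_neg hg]
    rw [if_neg (show ¬ ((if (s.toList[0] = '\'' ∨ s.toList[s.toList.length - 1] = '\'') then true
        else if (s.toList[0] = '"' ∨ s.toList[s.toList.length - 1] = '"') then true else false) = true) by
      rw [if_neg h1, if_neg h2]; simp)]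
    -- the early 'return False' inside A's loop can never fire
    have hq : ∀ j : Nat, (h : j < s.toList.length) → s.toList[j] = '\'' →
        0 < j ∧ j < s.toList.length - 1 := by
      intro j hj hqj
      constructor
      · rcases Nat.eq_zero_or_pos j with h | h
        · subst h; exact absurd (Or.inl hqj) h1
        · exact h
      · by_cases hje : j = s.toList.length - 1
        · subst hje; exact absurd (Or.inr hqj) h1
        · omega
    have hloop := sayLoop_spec s.toList hq s.toList.length 0 rfl (by omega) 0 (-1) (by omega)
    rw [if_pos (by norm_num : (-1 : Int) < 0)] at hloop
    simp only [Nat.cast_zero, List.drop_zero, Nat.zero_add, zero_add] at hloop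
    have hB := altScan_eq s.toList false
    simp only [Bool.false_eq_true, if_false, add_zero] at hB
    by_cases hcount : s.toList.count '\'' = 1
    · -- exactly one quote: find its position
      have hnn : s.toList.findIdx? (fun x => x == '\'') ≠ none := by
        intro hno
        have hmem : '\'' ∈ s.toList := List.count_pos_iff.mp (by omega)
        have := (List.findIdx?_eq_none_iff.mp hno) '\'' hmem
        simp at this
      obtain ⟨j, hj⟩ := Option.ne_none_iff_exists'.mp hnn
      obtain ⟨hjlt, hpj, _hmin⟩ := List.findIdx?_eq_some_iff_getElem.mp hj
      have hqj : s.toList[j] = '\'' := by simpa using hpj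
      obtain ⟨hj0, hjtop⟩ := hq j hjlt hqj
      rw [hj] at hloop
      rw [hloop, Option.elim_some]
      dsimp only
      rw [if_pos (by exact_mod_cast hcount : ((s.toList.count '\'' : Int)) = 1)]
      have hs1 : PySem.List.slice s.toList none (some ((j : Nat) : Int)) = s.toList.take j :=
        PySem.List.slice_to_natCast s.toList j
      have hs2 : PySem.List.slice s.toList (some (((j : Nat) : Int) + 1)) none = s.toList.drop (j+1) := by
        have hcast : (((j : Nat) : Int) + 1) = (((j+1 : Nat) : Nat) : Int) := by push_cast; ring
        rw [hcast]
        exact PySem.List.slice_from_natCast s.toList (j+1)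
      simp only [hs1, hs2]
      -- decompose the string around the quote
      have hsplit : s.toList = s.toList.take j ++ s.toList[j] :: s.toList.drop (j+1) := by
        conv_lhs => rw [← List.take_append_drop j s.toList]
        rw [List.drop_eq_getElem_cons hjlt]
      have hqjb : (s.toList[j] == '\'') = true := by simp [hqj]
      have hcnt' : s.toList.count '\'' =
          (s.toList.take j).count '\'' + ((s.toList.drop (j+1)).count '\'' + 1) := by
        conv_lhs => rw [hsplit]
        rw [List.count_append, List.count_cons, hqjb]
        simp
      have htz : (s.toList.take j).count '\'' = 0 := by omega
      have hdz : (s.toList.drop (j+1)).count '\'' = 0 := by omega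
      have htq : ∀ c ∈ s.toList.take j, c ≠ '\'' := by
        intro c hc hceq; subst hceq; exact absurd (List.count_eq_zero.mp htz) (by simp [hc])
      have hdq : ∀ c ∈ s.toList.drop (j+1), c ≠ '\'' := by
        intro c hc hceq; subst hceq; exact absurd (List.count_eq_zero.mp hdz) (by simp [hc])
      have htne : s.toList.take j ≠ [] := by
        intro hnil
        rcases List.take_eq_nil_iff.mp hnil with h | h
        · omega
        · exact hpre h
      have hdne : s.toList.drop (j+1) ≠ [] := by
        intro hnil
        have := List.drop_eq_nil_iff.mp hnil
        omega
      -- both sides equal 'all alpha on both parts'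
      rw [hB]
      have hall : s.toList.all (fun c => c == '\'' || PySem.Chars.isalpha c) =
          ((s.toList.take j).all PySem.Chars.isalpha &&
           (s.toList.drop (j+1)).all PySem.Chars.isalpha) := by
        conv_lhs => rw [hsplit]
        rw [List.all_append, List.all_cons]
        rw [all_qoa_of_no_quote _ htq, all_qoa_of_no_quote _ hdq]
        simp [hqjb]
      simp only [PySem.Chars.strIsalpha, hall, hcount]
      simp [List.isEmpty_iff, htne, hdne, Bool.and_assoc]
      rw [Bool.eq_iff_iff]
      simp [List.all_eq_true]
    · -- quote count ≠ 1: both sides are false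
      rw [hloop, Option.elim_some]
      dsimp only
      rw [if_neg (by exact_mod_cast hcount : ¬ ((s.toList.count '\'' : Int)) = 1)]
      rw [hB]
      simp [hcount]
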